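-- pv_equiv track=rewrite | github.com/josueRdgz/DAA_projects | Proyecto 1/combinatoric.py | total_team_value
-- ===== SOURCE A (Python) =====
-- import itertools
--
-- def total_team_value(players):
--     best_value = 0
--     win_team = []
--     for team in itertools.permutations(range(len(players)), len(players[0])):
--         team_value = 0
--         for i, j in enumerate(team):
--             team_value += players[j][i]
--
--         if team_value > best_value:
--             best_value = team_value
--             win_team = team
--     final_team = []
--     for i, j in enumerate(win_team):
--         final_team.append((j, i))
--     return best_value, final_team
-- ===== SOURCE B (Python) =====
-- def total_team_value(players):
--     n = len(players)
--     k = len(players[0])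
--     if k > n:
--         return 0, []
--
--     # depth-first search over positions: at position i, try each unused player j
--     # in ascending order; keep strict improvements only, so the first (lexico-
--     # graphically smallest) assignment attaining the maximum wins, like A.
--     def best(i, used):
--         if i == k:
--             return 0, []
--         best_v = None
--         best_t = None
--         for j in range(n):
--             if j in used:
--                 continue
--             v, t = best(i + 1, used + [j])
--             v += players[j][i]
--             if best_v is None or v > best_v:
--                 best_v, best_t = v, [j] + t
--         return best_v, best_t
--
--     v, team = best(0, [])
--     if v <= 0:
--         return 0, []
--     return v, [(j, i) for i, j in enumerate(team)]
-- ===== Notes on version B (the rewrite author's own statement) =====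
-- stated objective: alternative
-- what changed: A enumerates every whole k-permutation via itertools and rescores each from scratch; B is a depth-first recursion over positions that extends partial assignments (sharing prefix sums) and keeps the first strict maximum, reproducing A's lexicographic tie-break.
-- outside the precondition, e.g. on total_team_value([]): A raises IndexError, B raises IndexError; on total_team_value([[1, 2], [3]]): A raises IndexError, B raises IndexError
import Mathlib
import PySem

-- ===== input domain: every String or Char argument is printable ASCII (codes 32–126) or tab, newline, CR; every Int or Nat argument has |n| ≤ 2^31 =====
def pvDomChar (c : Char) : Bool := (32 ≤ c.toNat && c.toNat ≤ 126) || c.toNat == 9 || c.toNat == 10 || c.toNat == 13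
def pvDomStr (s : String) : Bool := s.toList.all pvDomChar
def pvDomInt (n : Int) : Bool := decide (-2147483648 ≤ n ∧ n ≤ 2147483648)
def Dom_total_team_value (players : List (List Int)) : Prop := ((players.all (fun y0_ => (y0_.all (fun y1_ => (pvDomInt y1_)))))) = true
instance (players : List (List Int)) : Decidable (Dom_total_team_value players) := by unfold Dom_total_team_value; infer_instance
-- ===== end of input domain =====

-- B replaces A's enumeration of all whole permutations (each rescored from scratch) by a
-- depth-first recursion over positions that shares prefix work and keeps the first strict
-- maximum, matching A's lexicographic tie-break; objective: alternative.

-- ===== PORT A =====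
-- itertools.permutations(pool, k) for a duplicate-free pool, in the order itertools yields them
def pyPermutations (pool : List Int) : Nat → List (List Int)
  | 0 => [[]]
  | Nat.succ k => pool.flatMap (fun x => (pyPermutations (pool.erase x) k).map (x :: ·))

def total_team_value (players : List (List Int)) : Int × (List (Int × Int)) :=
  let n : Int := players.length
  let k : Nat := (PySem.List.pyGetD players 0 []).length   -- len(players[0]); Pre_ excludes the raising empty case
  let r := (pyPermutations (PySem.List.pyRange 0 n 1) k).foldl
    (fun (acc : Int × List Int) team =>
      let team_value := (PySem.List.enumerate team).foldl
        (fun tv p => tv + PySem.List.pyGetD (PySem.List.pyGetD players p.2 []) p.1 0) 0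
      if team_value > acc.1 then (team_value, team) else acc) (0, [])
  let final_team := (PySem.List.enumerate r.2).foldl
    (fun ft (p : Int × Int) => ft ++ [(p.2, p.1)]) ([] : List (Int × Int))
  (r.1, final_team)

-- ===== PORT B =====
-- Source B's `best(i, used)`: recursion on the number of remaining positions rem = k - i
-- (the obvious structural measure); i is recovered as k - rem.
def dfsBest (players : List (List Int)) (n k : Int) : Nat → List Int → Int × List Int
  | 0, _ => (0, [])
  | Nat.succ rem, used =>
    let i : Int := k - ((rem : Int) + 1)
    (((PySem.List.pyRange 0 n 1).foldl
      (fun (acc : Option (Int × List Int)) j =>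
        if j ∈ used then acc
        else
          let r := dfsBest players n k rem (used ++ [j])
          let v := r.1 + PySem.List.pyGetD (PySem.List.pyGetD players j []) i 0
          match acc with
          | none => some (v, j :: r.2)
          | some b => if v > b.1 then some (v, j :: r.2) else some b) none).getD (0, []))

def total_team_value_alt (players : List (List Int)) : Int × (List (Int × Int)) :=
  let n : Int := players.length
  let k : Int := ((PySem.List.pyGetD players 0 []).length : Int)   -- len(players[0]); Pre_ excludes the raising empty case
  if k > n then (0, [])
  else
    let r := dfsBest players n k k.toNat []
    if r.1 ≤ 0 then (0, [])
    else (r.1, (PySem.List.enumerate r.2).map (fun p => (p.2, p.1)))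

-- ===== PRECONDITION & SPEC =====
-- Pre_ excludes exactly the inputs where Python A raises: empty players (players[0] → IndexError)
-- and, when a full assignment exists (k ≤ n), any row shorter than k (players[j][i] → IndexError).
def Pre_total_team_value (players : List (List Int)) : Prop :=
  players ≠ [] ∧
    ((players.headD []).length ≤ players.length →
      ∀ row ∈ players, (players.headD []).length ≤ row.length)
instance (players : List (List Int)) : Decidable (Pre_total_team_value players) := by
  unfold Pre_total_team_value; infer_instance

def pvWitness_total_team_value : List (List Int) := [[1, 2], [3, 4], [0, 5]]

def Spec_total_team_value (players : List (List Int)) (out : Int × (List (Int × Int))) : Prop := out = total_team_value_alt players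
instance (players : List (List Int)) (out : Int × (List (Int × Int))) : Decidable (Spec_total_team_value players out) := by unfold Spec_total_team_value; infer_instance

-- ===== CLAIM (what is proved, stated in full; the proofs are below) =====
def Claim_equal_total_team_value : Prop := ∀ (players : List (List Int)), Dom_total_team_value players → Pre_total_team_value players → Spec_total_team_value players (total_team_value players)

-- ===== LEMMAS AND PROOFS =====

-- score of a partial team t placed at positions i, i+1, …
def pvScore (players : List (List Int)) : Int → List Int → Int
  | _, [] => 0
  | i, j :: t => PySem.List.pyGetD (PySem.List.pyGetD players j []) i 0 + pvScore players (i + 1) t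

-- "first strict maximum" combining step and its fold (the canonical best-of-a-list)
def pvUpd (players : List (List Int)) (i : Int) (acc : Option (Int × List Int)) (t : List Int) :
    Option (Int × List Int) :=
  match acc with
  | none => some (pvScore players i t, t)
  | some b => if pvScore players i t > b.1 then some (pvScore players i t, t) else some b

def pvBest (players : List (List Int)) (i : Int) (l : List (List Int)) : Option (Int × List Int) :=
  l.foldl (pvUpd players i) none

theorem pvPerm_eq_nil : ∀ (k : Nat) (pool : List Int), pool.length < k → pyPermutations pool k = [] := by
  intro k
  induction k with
  | zero => intro pool h; omega
  | succ k ih =>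
    intro pool h
    simp only [pyPermutations, List.flatMap_eq_nil_iff, List.map_eq_nil_iff]
    intro x hx
    apply ih
    have hpos := List.length_pos_of_mem hx
    rw [List.length_erase_of_mem hx]
    omega

theorem pvPerm_ne_nil : ∀ (k : Nat) (pool : List Int), k ≤ pool.length → pyPermutations pool k ≠ [] := by
  intro k
  induction k with
  | zero => intro pool _; simp [pyPermutations]
  | succ k ih =>
    intro pool h
    cases pool with
    | nil => simp at h
    | cons y ys =>
      have h1 : pyPermutations ((y :: ys).erase y) k ≠ [] := by
        apply ih
        simp only [List.erase_cons_head]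
        simp at h
        omega
      intro hc
      simp only [pyPermutations, List.flatMap_eq_nil_iff, List.map_eq_nil_iff] at hc
      exact h1 (hc y (by simp))

theorem pvFoldl_upd_some (players : List (List Int)) (i : Int) :
    ∀ (l : List (List Int)) (b : Int × List Int),
      l.foldl (pvUpd players i) (some b) =
        some (match l.foldl (pvUpd players i) none with
              | none => b
              | some c => if c.1 > b.1 then c else b) := by
  intro l
  induction l with
  | nil => intro b; simp
  | cons t ts ih =>
    intro b
    have hstep : pvUpd players i (some b) t =
        some (if pvScore players i t > b.1 then (pvScore players i t, t) else b) := by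
      simp only [pvUpd]; split_ifs <;> rfl
    have h0 : pvUpd players i none t = some (pvScore players i t, t) := rfl
    simp only [List.foldl_cons, hstep, h0, ih]
    cases hts : ts.foldl (pvUpd players i) none with
    | none => simp
    | some c => simp only []; split_ifs <;> first | rfl | omega

theorem pvBest_isSome (players : List (List Int)) (i : Int) {l : List (List Int)} (h : l ≠ []) :
    ∃ c, pvBest players i l = some c := by
  cases l with
  | nil => exact absurd rfl h
  | cons t ts =>
    unfold pvBest
    have h0 : pvUpd players i none t = some (pvScore players i t, t) := rfl
    rw [List.foldl_cons, h0, pvFoldl_upd_some]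
    exact ⟨_, rfl⟩

theorem pvScore_enum (players : List (List Int)) :
    ∀ (t : List Int) (i0 s : Int),
      (PySem.List.enumerate t i0).foldl
        (fun tv p => tv + PySem.List.pyGetD (PySem.List.pyGetD players p.2 []) p.1 0) s =
      s + pvScore players i0 t := by
  intro t
  induction t with
  | nil => intro i0 s; simp [PySem.List.enumerate_nil, pvScore]
  | cons j t ih =>
    intro i0 s
    simp only [PySem.List.enumerate_cons, List.foldl_cons, pvScore, ih]
    omega

theorem pvFoldA (players : List (List Int)) :
    ∀ (l : List (List Int)) (b : Int × List Int),
      l.foldl (fun (acc : Int × List Int) team =>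
          let team_value := (PySem.List.enumerate team).foldl
            (fun tv p => tv + PySem.List.pyGetD (PySem.List.pyGetD players p.2 []) p.1 0) 0
          if team_value > acc.1 then (team_value, team) else acc) b =
      (match pvBest players 0 l with
       | none => b
       | some c => if c.1 > b.1 then c else b) := by
  intro l
  induction l with
  | nil => intro b; simp [pvBest]
  | cons t ts ih =>
    intro b
    have hsc : (PySem.List.enumerate t).foldl
        (fun tv p => tv + PySem.List.pyGetD (PySem.List.pyGetD players p.2 []) p.1 0) 0 =
        pvScore players 0 t := by
      rw [pvScore_enum]; omega
    have h0 : pvUpd players 0 none t = some (pvScore players 0 t, t) := rfl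
    simp only [List.foldl_cons, hsc, ih, pvBest, h0, pvFoldl_upd_some]
    cases hts : ts.foldl (pvUpd players 0) none with
    | none => simp
    | some c => simp only []; split_ifs <;> first | rfl | omega

theorem pvSkip_fold {α : Type} (used : List Int) (f : α → Int → α) :
    ∀ (l : List Int) (acc : α),
      l.foldl (fun acc j => if j ∈ used then acc else f acc j) acc =
      (l.filter (fun j => decide (j ∉ used))).foldl f acc := by
  intro l
  induction l with
  | nil => intro acc; rfl
  | cons x xs ih =>
    intro acc
    by_cases h : x ∈ used <;> simp [h, ih]

theorem pvMap_block (players : List (List Int)) (j i : Int) :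
    ∀ (l : List (List Int)) (acc : Option (Int × List Int)),
      (l.map (j :: ·)).foldl (pvUpd players i)
          (acc.map (fun c => (c.1 + PySem.List.pyGetD (PySem.List.pyGetD players j []) i 0, j :: c.2))) =
      (l.foldl (pvUpd players (i + 1)) acc).map
          (fun c => (c.1 + PySem.List.pyGetD (PySem.List.pyGetD players j []) i 0, j :: c.2)) := by
  intro l
  induction l with
  | nil => intro acc; simp
  | cons t ts ih =>
    intro acc
    have hstep : pvUpd players i
        (acc.map (fun c => (c.1 + PySem.List.pyGetD (PySem.List.pyGetD players j []) i 0, j :: c.2))) (j :: t) =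
        (pvUpd players (i + 1) acc t).map
          (fun c => (c.1 + PySem.List.pyGetD (PySem.List.pyGetD players j []) i 0, j :: c.2)) := by
      cases acc with
      | none => simp [pvUpd, pvScore, Int.add_comm]
      | some b =>
        simp only [pvUpd, pvScore, Option.map_some]
        split_ifs <;> simp_all <;> omega
    simp only [List.map_cons, List.foldl_cons, hstep, ih]

theorem pvFoldl_flatMap {α β γ : Type} (f : γ → β → γ) (g : α → List β) :
    ∀ (l : List α) (acc : γ),
      (l.flatMap g).foldl f acc = l.foldl (fun acc x => (g x).foldl f acc) acc := by
  intro l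
  induction l with
  | nil => intro acc; rfl
  | cons x xs ih =>
    intro acc
    simp [List.flatMap_cons, List.foldl_append, ih]

theorem pvMain (players : List (List Int)) (n k : Int) :
    ∀ (rem : Nat) (used : List Int),
      rem ≤ ((PySem.List.pyRange 0 n 1).filter (fun x => decide (x ∉ used))).length →
      dfsBest players n k rem used =
        (pvBest players (k - (rem : Int))
          (pyPermutations ((PySem.List.pyRange 0 n 1).filter (fun x => decide (x ∉ used))) rem)).getD (0, []) := by
  intro rem
  induction rem with
  | zero =>
    intro used _
    simp [dfsBest, pyPermutations, pvBest, pvUpd, pvScore]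
  | succ rem ih =>
    intro used h
    have hcast : ((rem + 1 : Nat) : Int) = (rem : Int) + 1 := by push_cast; ring
    set A := (PySem.List.pyRange 0 n 1).filter (fun x => decide (x ∉ used)) with hA
    have herase : ∀ x ∈ A, A.erase x =
        (PySem.List.pyRange 0 n 1).filter (fun y => decide (y ∉ used ++ [x])) := by
      intro x hx
      have hnd : A.Nodup := List.Nodup.filter _ (PySem.List.nodup_pyRange_one 0 n)
      rw [hA, List.Nodup.erase_eq_filter (by rw [← hA]; exact hnd) x, List.filter_filter]
      apply List.filter_congr
      intro y _
      by_cases hy1 : y ∈ used <;> by_cases hy2 : y = x <;> simp [List.mem_append, hy1, hy2]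
    have hstart : dfsBest players n k (rem + 1) used =
        ((PySem.List.pyRange 0 n 1).foldl
          (fun (acc : Option (Int × List Int)) j =>
            if j ∈ used then acc
            else
              (fun (acc : Option (Int × List Int)) j =>
                let r := dfsBest players n k rem (used ++ [j])
                let v := r.1 + PySem.List.pyGetD (PySem.List.pyGetD players j [])
                  (k - ((rem : Int) + 1)) 0
                match acc with
                | none => some (v, j :: r.2)
                | some b => if v > b.1 then some (v, j :: r.2) else some b) acc j) none).getD (0, []) := rfl
    rw [hstart, pvSkip_fold, hcast]
    have hperm : pyPermutations A (rem + 1) =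
        A.flatMap (fun x => (pyPermutations (A.erase x) rem).map (x :: ·)) := rfl
    rw [hperm]
    show _ = ((A.flatMap fun x => (pyPermutations (A.erase x) rem).map (x :: ·)).foldl
      (pvUpd players (k - ((rem : Int) + 1))) none).getD (0, [])
    rw [pvFoldl_flatMap]
    congr 1
    refine PySem.List.foldl_congr_mem A _ _ none ?_
    intro acc x hx
    have hxu : x ∉ used := by simpa using (List.mem_filter.mp hx).2
    have hlen1 : rem ≤ (A.erase x).length := by
      rw [List.length_erase_of_mem hx]
      omega
    have hih := ih (used ++ [x]) (by rw [← herase x hx]; exact hlen1)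
    rw [← herase x hx] at hih
    obtain ⟨c, hc⟩ := pvBest_isSome players (k - (rem : Int))
      (pvPerm_ne_nil rem (A.erase x) hlen1)
    rw [hc, Option.getD_some] at hih
    have hi1 : k - ((rem : Int) + 1) + 1 = k - (rem : Int) := by ring
    have hblock : ((pyPermutations (A.erase x) rem).map (x :: ·)).foldl
        (pvUpd players (k - ((rem : Int) + 1))) none =
        some (c.1 + PySem.List.pyGetD (PySem.List.pyGetD players x [])
          (k - ((rem : Int) + 1)) 0, x :: c.2) := by
      have hmb := pvMap_block players x (k - ((rem : Int) + 1))
        (pyPermutations (A.erase x) rem) none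
      simp only [Option.map_none] at hmb
      rw [hmb, hi1]
      show (pvBest players (k - (rem : Int)) (pyPermutations (A.erase x) rem)).map _ = _
      rw [hc, Option.map_some]
    cases acc with
    | none =>
      simp only [hih, hblock]
    | some b =>
      rw [pvFoldl_upd_some, hblock]
      simp only [hih]
      split_ifs <;> rfl

theorem pvFlatten_map_singleton {α β : Type} (f : α → β) :
    ∀ l : List α, (l.map (fun x => [f x])).flatten = l.map f := by
  intro l
  induction l with
  | nil => rfl
  | cons x xs ih => simp [ih]

theorem pv_ports_eq (players : List (List Int)) :
    total_team_value players = total_team_value_alt players := by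
  by_cases hk : ((PySem.List.pyGetD players 0 []).length : Int) > (players.length : Int)
  · -- no full assignment exists: A folds over the empty permutation list, B takes its guard
    have hlen : (PySem.List.pyRange 0 (players.length : Int) 1).length = players.length := by
      simp [PySem.List.length_pyRange_one]
    have hperm : pyPermutations (PySem.List.pyRange 0 (players.length : Int) 1)
        (PySem.List.pyGetD players 0 []).length = [] := by
      apply pvPerm_eq_nil
      rw [hlen]
      omega
    simp [total_team_value, total_team_value_alt, hperm, hk, PySem.List.enumerate_nil]
  · have hle : (PySem.List.pyGetD players 0 []).length ≤ players.length := by omega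
    have hlen : (PySem.List.pyRange 0 (players.length : Int) 1).length = players.length := by
      simp [PySem.List.length_pyRange_one]
    have hfilter : (PySem.List.pyRange 0 (players.length : Int) 1).filter
        (fun x => decide (x ∉ ([] : List Int))) = PySem.List.pyRange 0 (players.length : Int) 1 := by
      simp
    have hmain := pvMain players (players.length : Int)
      ((PySem.List.pyGetD players 0 []).length : Int) (PySem.List.pyGetD players 0 []).length []
      (by rw [hfilter, hlen]; exact hle)
    rw [hfilter] at hmain
    have hz : ((PySem.List.pyGetD players 0 []).length : Int) -
        ((PySem.List.pyGetD players 0 []).length : Nat) = 0 := by omega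
    rw [hz] at hmain
    obtain ⟨c, hc⟩ := pvBest_isSome players 0
      (pvPerm_ne_nil (PySem.List.pyGetD players 0 []).length
        (PySem.List.pyRange 0 (players.length : Int) 1) (by rw [hlen]; exact hle))
    rw [hc, Option.getD_some] at hmain
    have htoNat : ((PySem.List.pyGetD players 0 []).length : Int).toNat =
        (PySem.List.pyGetD players 0 []).length := by omega
    have hA := pvFoldA players
      (pyPermutations (PySem.List.pyRange 0 (players.length : Int) 1)
        (PySem.List.pyGetD players 0 []).length) (0, [])
    rw [hc] at hA
    simp only [total_team_value, total_team_value_alt, if_neg hk, htoNat, hmain, hA]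
    by_cases hpos : c.1 > 0
    · rw [if_pos hpos, if_neg (by omega)]
      simp [pvFlatten_map_singleton]
    · rw [if_neg hpos, if_pos (by omega)]
      simp [PySem.List.enumerate_nil]

-- ===== VERDICT (by name: the statement is the Claim_ definition above) =====
theorem total_team_value_spec : Claim_equal_total_team_value := by
  intro players _ _
  unfold Spec_total_team_value
  exact pv_ports_eq players
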